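-- pv_equiv track=rewrite | github.com/sge47/Computing_Boot_Camp | a8.py | find_best_meeting_time
-- ===== SOURCE A (Python) =====
-- def find_vip_slots(vip_participants, num_slots):
--     '''
--     Finds the slots that work for all the VIPs.
--
--     vip_participants, num_slots: Same as find_best_meeting_time
--
--     Returns: (list of integers) A list with the slot numbers that work for all
--         the VIPs
--     '''
--     vip_slots = []
--
--     for slot in range(num_slots):
--         all_available = True
--         for vip in vip_participants:
--             if not vip[slot]:
--                 all_available = False
--                 break
--         if all_available:
--             vip_slots.append(slot)
--
--     return vip_slots
--
-- def find_best_meeting_time(vip_participants, other_participants, num_slots):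
--     '''
--     Finds the best meeting for some participants.
--
--     vip_participants: (list of lists of booleans) The availability
--        lists of the VIP participants
--     other_participants: (list of lists of booleans) The availability
--        lists of the non-VIP participants
--     num_slots: (int) The number of slots
--
--     Returns: ((int, int) tuple) The best meeting slot and the number of
--         participants in that slot. (None, 0) if no meeting is possible.
--     '''
--     vip_slots = find_vip_slots(vip_participants, num_slots)
--     best_slot = None
--     max_participants = 0
--
--     for slot in vip_slots:
--         count = 0
--         for participant in vip_participants + other_participants:
--             if participant[slot]:
--                 count += 1
--         if count > max_participants:
--             best_slot = slot
--             max_participants = count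
--     if best_slot is None:
--         return (None, 0)
--     return(best_slot, max_participants)
-- ===== SOURCE B (Python) =====
-- def find_best_meeting_time(vip_participants, other_participants, num_slots):
--     n = max(num_slots, 0)
--     num_vips = len(vip_participants)
--     vip_free = [0] * n
--     total_free = [0] * n
--     for p in vip_participants:
--         for s in range(n):
--             if p[s]:
--                 vip_free[s] += 1
--     for p in vip_participants + other_participants:
--         for s in range(n):
--             if p[s]:
--                 total_free[s] += 1
--     best_slot = None
--     max_participants = 0
--     for s in range(n):
--         if vip_free[s] == num_vips and total_free[s] > max_participants:
--             best_slot = s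
--             max_participants = total_free[s]
--     return (best_slot, max_participants)
-- ===== Notes on version B (the rewrite author's own statement) =====
-- stated objective: alternative
-- what changed: Replaces A's per-slot rescans (valid-slot search with an inner VIP scan, then a full re-count of all participants for each valid slot) by building two per-slot tally arrays (VIP availability and total availability) in single passes over the participants, then one left-to-right scan over the slots taking a slot iff all VIPs are free and the total strictly improves.
-- outside the precondition, e.g. on find_best_meeting_time([[False]], [[]], 1): A returns (None, 0), B raises IndexError; on find_best_meeting_time([[False], []], [], 1): A returns (None, 0), B raises IndexError
import Mathlib
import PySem

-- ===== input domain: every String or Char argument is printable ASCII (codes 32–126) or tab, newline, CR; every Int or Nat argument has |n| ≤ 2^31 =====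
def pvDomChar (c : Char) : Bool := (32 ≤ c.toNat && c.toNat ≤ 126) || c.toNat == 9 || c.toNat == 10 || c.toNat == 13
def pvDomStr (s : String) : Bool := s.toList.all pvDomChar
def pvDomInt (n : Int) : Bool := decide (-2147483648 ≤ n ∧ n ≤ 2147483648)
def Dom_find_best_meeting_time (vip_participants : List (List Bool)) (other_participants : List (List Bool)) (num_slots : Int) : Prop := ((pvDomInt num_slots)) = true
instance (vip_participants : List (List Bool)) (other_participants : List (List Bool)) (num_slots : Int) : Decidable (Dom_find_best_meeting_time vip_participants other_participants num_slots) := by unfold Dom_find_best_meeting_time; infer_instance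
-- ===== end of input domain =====

-- B replaces A's per-valid-slot rescans by two per-slot tally arrays built in single passes
-- over the participants, then one scan over the slots (same asymptotic cost; alternative
-- decomposition). Equivalence is about the return value only (neither mutates its arguments).

-- ===== PORT A =====
-- inner 'for vip in vip_participants: if not vip[slot]: all_available=False; break'
def pvAllAvail (vips : List (List Bool)) (slot : Int) : Bool :=
  match vips with
  | [] => true
  | v :: rest => if !(PySem.List.pyGetD v slot false) then false else pvAllAvail rest slot

def pvFindVipSlots (vips : List (List Bool)) (num_slots : Int) : List Int :=
  (PySem.List.pyRange 0 num_slots 1).foldl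
    (fun acc slot => if pvAllAvail vips slot then acc ++ [slot] else acc) []

def pvCountAvail (parts : List (List Bool)) (slot : Int) : Int :=
  parts.foldl (fun c p => if PySem.List.pyGetD p slot false then c + 1 else c) 0

def find_best_meeting_time (vip_participants : List (List Bool)) (other_participants : List (List Bool)) (num_slots : Int) : Option Int × Int :=
  let vip_slots := pvFindVipSlots vip_participants num_slots
  let st := vip_slots.foldl
    (fun (st : Option Int × Int) slot =>
      let count := pvCountAvail (vip_participants ++ other_participants) slot
      if count > st.2 then (some slot, count) else st) (none, 0)
  match st.1 with
  | none => (none, 0)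
  | some b => (some b, st.2)

-- ===== PORT B =====
-- 'for s in range(n): if p[s]: arr[s] += 1'
def pvAddRow (n : Nat) (arr : List Int) (p : List Bool) : List Int :=
  (List.range n).foldl (fun a s => if p.getD s false then a.set s (a.getD s 0 + 1) else a) arr

def find_best_meeting_time_alt (vip_participants : List (List Bool)) (other_participants : List (List Bool)) (num_slots : Int) : Option Int × Int :=
  let n := num_slots.toNat   -- max(num_slots, 0)
  let numVips : Int := vip_participants.length
  let vipFree := vip_participants.foldl (pvAddRow n) (List.replicate n (0 : Int))
  let totalFree := (vip_participants ++ other_participants).foldl (pvAddRow n) (List.replicate n (0 : Int))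
  (List.range n).foldl
    (fun (st : Option Int × Int) s =>
      if vipFree.getD s 0 = numVips ∧ totalFree.getD s 0 > st.2
      then (some (s : Int), totalFree.getD s 0) else st) (none, 0)

-- ===== PRECONDITION & SPEC =====
-- Pre_ excludes inputs with an availability list shorter than num_slots: there Python A either
-- raises IndexError or (when the short list is never indexed) returns by accident of the break /
-- valid-slot structure, and B raises IndexError.
def Pre_find_best_meeting_time (vip_participants : List (List Bool)) (other_participants : List (List Bool)) (num_slots : Int) : Prop :=
  ∀ l ∈ vip_participants ++ other_participants, num_slots ≤ (l.length : Int)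
instance (vip_participants : List (List Bool)) (other_participants : List (List Bool)) (num_slots : Int) : Decidable (Pre_find_best_meeting_time vip_participants other_participants num_slots) := by unfold Pre_find_best_meeting_time; infer_instance

def pvWitness_find_best_meeting_time : List (List Bool) × List (List Bool) × Int :=
  ([[true, false]], [[true, true]], 2)

def Spec_find_best_meeting_time (vip_participants : List (List Bool)) (other_participants : List (List Bool)) (num_slots : Int) (out : Option Int × Int) : Prop := out = find_best_meeting_time_alt vip_participants other_participants num_slots
instance (vip_participants : List (List Bool)) (other_participants : List (List Bool)) (num_slots : Int) (out : Option Int × Int) : Decidable (Spec_find_best_meeting_time vip_participants other_participants num_slots out) := by unfold Spec_find_best_meeting_time; infer_instance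

-- ===== CLAIM (what is proved, stated in full; the proofs are below) =====
def Claim_equal_find_best_meeting_time : Prop := ∀ (vip_participants : List (List Bool)) (other_participants : List (List Bool)) (num_slots : Int), Dom_find_best_meeting_time vip_participants other_participants num_slots → Pre_find_best_meeting_time vip_participants other_participants num_slots → Spec_find_best_meeting_time vip_participants other_participants num_slots (find_best_meeting_time vip_participants other_participants num_slots)

-- ===== LEMMAS AND PROOFS =====

-- A's all-available flag is an 'all'
theorem pvAllAvail_eq (vips : List (List Bool)) (slot : Int) :
    pvAllAvail vips slot = vips.all (fun v => PySem.List.pyGetD v slot false) := by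
  induction vips with
  | nil => simp [pvAllAvail]
  | cons v rest ih =>
    simp only [pvAllAvail, List.all_cons, ih]
    cases h : PySem.List.pyGetD v slot false <;> simp

-- B's row update preserves the array length
theorem pvAddRow_length (n : Nat) (arr : List Int) (p : List Bool) :
    (pvAddRow n arr p).length = arr.length := by
  unfold pvAddRow
  induction (List.range n) generalizing arr with
  | nil => simp
  | cons s l ih =>
    simp only [List.foldl_cons]
    rw [ih]
    split <;> simp

-- one row update, read pointwise
theorem pvAddRow_getD' (n : Nat) (arr : List Int) (p : List Bool) (s : Nat)
    (hs : s < arr.length) :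
    (pvAddRow n arr p).getD s 0 = arr.getD s 0 + (if s < n ∧ p.getD s false then 1 else 0) := by
  induction n with
  | zero => simp [pvAddRow]
  | succ m ih =>
    have hlen : (pvAddRow m arr p).length = arr.length := pvAddRow_length m arr p
    unfold pvAddRow at ih hlen ⊢
    rw [List.range_succ, List.foldl_append, List.foldl_cons, List.foldl_nil]
    by_cases hsm : s = m
    · subst hsm
      by_cases hp : p.getD s false
      · rw [if_pos hp, List.getD_eq_getElem?_getD, List.getElem?_set_self (by omega),
            Option.getD_some, ih, if_pos (And.intro (Nat.lt_succ_self s) hp)]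
        have h1 : ¬ (s < s ∧ p.getD s false = true) := by rintro ⟨h, _⟩; omega
        rw [if_neg h1]; ring
      · rw [if_neg hp, ih]
        have h1 : ¬ (s < s ∧ p.getD s false = true) := by rintro ⟨h, _⟩; omega
        have h2 : ¬ (s < s + 1 ∧ p.getD s false = true) := by
          rintro ⟨_, h⟩; exact hp h
        rw [if_neg h1, if_neg h2]
    · have hcond : (s < m + 1 ∧ p.getD s false = true) ↔ (s < m ∧ p.getD s false = true) := by
        constructor
        · rintro ⟨h1, h2⟩; exact ⟨by omega, h2⟩
        · rintro ⟨h1, h2⟩; exact ⟨by omega, h2⟩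
      by_cases hp : p.getD m false
      · rw [if_pos hp, List.getD_eq_getElem?_getD, List.getElem?_set_ne (by omega), ← List.getD_eq_getElem?_getD, ih]
        rw [if_congr hcond rfl rfl]
      · rw [if_neg hp, ih, if_congr hcond rfl rfl]

theorem pvAddRow_getD (n : Nat) (arr : List Int) (p : List Bool) (s : Nat)
    (hs : s < arr.length) (hn : s < n) :
    (pvAddRow n arr p).getD s 0 = arr.getD s 0 + (if p.getD s false then 1 else 0) := by
  rw [pvAddRow_getD' n arr p s hs]
  by_cases hp : p.getD s false <;> simp [hp, hn]

-- folding all rows: the tally at slot s counts the rows available at s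
theorem pvTally_getD (n : Nat) (ps : List (List Bool)) (arr : List Int) (s : Nat)
    (harr : arr.length = n) (hn : s < n) :
    (ps.foldl (pvAddRow n) arr).getD s 0 = arr.getD s 0 + (ps.countP (fun p => p.getD s false) : Int) := by
  induction ps generalizing arr with
  | nil => simp
  | cons p rest ih =>
    rw [List.foldl_cons, ih _ (by rw [pvAddRow_length]; exact harr),
        pvAddRow_getD n arr p s (by omega) hn, List.countP_cons]
    split <;> simp <;> ring

-- common normal form of both programs (proof-only)
def pvValid (vips : List (List Bool)) (s : Nat) : Bool := vips.all (fun v => v.getD s false)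

def pvTot (parts : List (List Bool)) (s : Nat) : Int := (parts.countP (fun p => p.getD s false) : Int)

def pvNorm (vips others : List (List Bool)) (n : Nat) : Option Int × Int :=
  (List.range n).foldl
    (fun (st : Option Int × Int) s =>
      if pvValid vips s ∧ pvTot (vips ++ others) s > st.2
      then (some (s : Int), pvTot (vips ++ others) s) else st) (none, 0)

theorem pvTally0 (n : Nat) (ps : List (List Bool)) (s : Nat) (hs : s < n) :
    (ps.foldl (pvAddRow n) (List.replicate n (0 : Int))).getD s 0
      = (ps.countP (fun p => p.getD s false) : Int) := by
  rw [pvTally_getD n ps _ s (by simp) hs]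
  simp

theorem pvValid_iff (vips : List (List Bool)) (s : Nat) :
    ((vips.countP (fun p => p.getD s false) : Int) = (vips.length : Int)) ↔ pvValid vips s = true := by
  rw [Nat.cast_inj, List.countP_eq_length]
  unfold pvValid
  rw [List.all_eq_true]

theorem pvCountAvail_eq (parts : List (List Bool)) (s : Nat) :
    pvCountAvail parts ((s : Nat) : Int) = pvTot parts s := by
  unfold pvCountAvail pvTot
  simp only [PySem.List.pyGetD_natCast]
  rw [PySem.List.foldl_if_add_one]
  simp

theorem pvAllAvail_natCast (vips : List (List Bool)) (s : Nat) :
    pvAllAvail vips ((s : Nat) : Int) = pvValid vips s := by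
  rw [pvAllAvail_eq]
  unfold pvValid
  simp only [PySem.List.pyGetD_natCast]

theorem pvB_eq (vips others : List (List Bool)) (ns : Int) :
    find_best_meeting_time_alt vips others ns = pvNorm vips others ns.toNat := by
  unfold find_best_meeting_time_alt pvNorm
  apply PySem.List.foldl_congr_mem
  intro st s hsmem
  have hs : s < ns.toNat := List.mem_range.mp hsmem
  rw [pvTally0 ns.toNat vips s hs, pvTally0 ns.toNat (vips ++ others) s hs]
  rw [if_congr (and_congr (pvValid_iff vips s) Iff.rfl) rfl rfl]
  rfl

theorem pvNorm_inv (vips others : List (List Bool)) (l : List Nat) (init : Option Int × Int)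
    (h : init.1 = none → init.2 = 0) :
    (l.foldl
      (fun (st : Option Int × Int) s =>
        if pvValid vips s ∧ pvTot (vips ++ others) s > st.2
        then (some (s : Int), pvTot (vips ++ others) s) else st) init).1 = none →
    (l.foldl
      (fun (st : Option Int × Int) s =>
        if pvValid vips s ∧ pvTot (vips ++ others) s > st.2
        then (some (s : Int), pvTot (vips ++ others) s) else st) init).2 = 0 := by
  induction l generalizing init with
  | nil => simpa using h
  | cons s l ih =>
    rw [List.foldl_cons]
    apply ih
    by_cases hc : pvValid vips s ∧ pvTot (vips ++ others) s > init.2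
    · rw [if_pos hc]; intro hnone; cases hnone
    · rw [if_neg hc]; exact h

theorem pvNorm_none (vips others : List (List Bool)) (n : Nat) :
    (pvNorm vips others n).1 = none → (pvNorm vips others n).2 = 0 := by
  unfold pvNorm
  exact pvNorm_inv vips others (List.range n) (none, 0) (fun _ => rfl)

theorem pvA_eq (vips others : List (List Bool)) (ns : Int) :
    find_best_meeting_time vips others ns = pvNorm vips others ns.toNat := by
  unfold find_best_meeting_time pvFindVipSlots
  rw [PySem.List.foldl_append_if_eq_filter]
  simp only [List.nil_append]
  rw [← PySem.List.foldl_if_eq_foldl_filter]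
  rw [PySem.List.pyRange_one]
  simp only [Int.sub_zero, zero_add]
  rw [List.foldl_map]
  have hfold :
      (List.range ns.toNat).foldl
        (fun (st : Option Int × Int) k =>
          if pvAllAvail vips ((k : Nat) : Int) then
            (let count := pvCountAvail (vips ++ others) ((k : Nat) : Int);
             if count > st.2 then (some ((k : Nat) : Int), count) else st)
          else st) (none, 0) = pvNorm vips others ns.toNat := by
    unfold pvNorm
    apply PySem.List.foldl_congr_mem
    intro st s hsmem
    rw [pvAllAvail_natCast]
    simp only [pvCountAvail_eq]
    by_cases hv : pvValid vips s
    · rw [if_pos hv]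
      by_cases hc : pvTot (vips ++ others) s > st.2
      · rw [if_pos hc, if_pos ⟨hv, hc⟩]
      · rw [if_neg hc, if_neg (by rintro ⟨_, h⟩; exact hc h)]
    · rw [if_neg (by simp [hv]), if_neg (by rintro ⟨h, _⟩; exact hv h)]
  rw [hfold]
  cases hst : (pvNorm vips others ns.toNat).1 with
  | none => exact (Prod.ext hst (pvNorm_none vips others ns.toNat hst)).symm
  | some b => exact (Prod.ext hst.symm rfl)

-- ===== VERDICT (by name: the statement is the Claim_ definition above) =====
theorem find_best_meeting_time_spec : Claim_equal_find_best_meeting_time := by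
  intro vips others ns _ _
  unfold Spec_find_best_meeting_time
  rw [pvA_eq, pvB_eq]
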